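-- pv_equiv track=rewrite | github.com/tailnixpix/posit-ev | telegram_bot.py | _parse_free_text
-- ===== SOURCE A (Python) =====
-- MARKET_KEYWORDS: dict = {
--     "moneyline": "h2h",
--     "ml":        "h2h",
--     "spread":    "spreads",
--     "spreads":   "spreads",
--     "ats":       "spreads",
--     "total":     "totals",
--     "totals":    "totals",
--     "ou":        "totals",
--     "props":     "player_props",
--     "prop":      "player_props",
-- }
--
-- SPORT_KEYWORDS: dict = {
--     "nhl":        ["icehockey_nhl"],
--     "hockey":     ["icehockey_nhl"],
--     "nba":        ["basketball_nba"],
--     "basketball": ["basketball_nba"],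
--     "mlb":        ["baseball_mlb"],
--     "baseball":   ["baseball_mlb"],
--     "epl":        ["soccer_epl"],
--     "premier":    ["soccer_epl"],
--     "laliga":     ["soccer_spain_la_liga"],
--     "la liga":    ["soccer_spain_la_liga"],
--     "bundesliga": ["soccer_germany_bundesliga"],
--     "mls":        ["soccer_usa_mls"],
--     "soccer":     ["soccer_epl", "soccer_spain_la_liga",
--                    "soccer_germany_bundesliga", "soccer_usa_mls"],
-- }
--
-- def _parse_free_text(text: str) -> tuple:
--     """
--     Parse a free-form message into (team_query, filter_market, sport_keys).
--
--     Tokens are matched against market and sport keyword lists; whatever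
--     remains is treated as the team name.  Order doesn't matter.
--
--     Examples
--     --------
--     "Lakers props"      → ("Lakers", "player_props", None)
--     "NHL spread"        → ("",        "spreads",      [...nhl key...])
--     "Arsenal moneyline" → ("Arsenal", "h2h",          None)
--     "Bruins"            → ("Bruins",  None,            None)
--     "nba total"         → ("",        "totals",        [...nba key...])
--     """
--     from scripts.odds_fetcher import SPORT_KEYS as ALL_SPORT_KEYS
--
--     tokens     = text.strip().split()
--     remaining  = []
--     market_key = None
--     sport_keys = None
--
--     for token in tokens:
--         lower = token.lower()
--         if lower in MARKET_KEYWORDS and market_key is None: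
--             market_key = MARKET_KEYWORDS[lower]
--         elif lower in SPORT_KEYWORDS and sport_keys is None:
--             sport_keys = SPORT_KEYWORDS[lower]
--         else:
--             remaining.append(token)
--
--     team_query = " ".join(remaining).strip()
--     return team_query, market_key, sport_keys
-- ===== SOURCE B (Python) =====
-- MARKET_KEYWORDS: dict = {
--     "moneyline": "h2h",
--     "ml":        "h2h",
--     "spread":    "spreads",
--     "spreads":   "spreads",
--     "ats":       "spreads",
--     "total":     "totals",
--     "totals":    "totals",
--     "ou":        "totals",
--     "props":     "player_props",
--     "prop":      "player_props",
-- }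
--
-- SPORT_KEYWORDS: dict = {
--     "nhl":        ["icehockey_nhl"],
--     "hockey":     ["icehockey_nhl"],
--     "nba":        ["basketball_nba"],
--     "basketball": ["basketball_nba"],
--     "mlb":        ["baseball_mlb"],
--     "baseball":   ["baseball_mlb"],
--     "epl":        ["soccer_epl"],
--     "premier":    ["soccer_epl"],
--     "laliga":     ["soccer_spain_la_liga"],
--     "la liga":    ["soccer_spain_la_liga"],
--     "bundesliga": ["soccer_germany_bundesliga"],
--     "mls":        ["soccer_usa_mls"],
--     "soccer":     ["soccer_epl", "soccer_spain_la_liga",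
--                    "soccer_germany_bundesliga", "soccer_usa_mls"],
-- }
--
-- def _parse_free_text(text: str) -> tuple:
--     tokens = text.strip().split()
--     midx = next((i for i, t in enumerate(tokens) if t.lower() in MARKET_KEYWORDS), None)
--     sidx = next((i for i, t in enumerate(tokens) if t.lower() in SPORT_KEYWORDS), None)
--     market_key = MARKET_KEYWORDS[tokens[midx].lower()] if midx is not None else None
--     sport_keys = SPORT_KEYWORDS[tokens[sidx].lower()] if sidx is not None else None
--     team_query = " ".join(
--         t for i, t in enumerate(tokens) if i != midx and i != sidx
--     ).strip()
--     return team_query, market_key, sport_keys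
-- ===== Notes on version B (the rewrite author's own statement) =====
-- stated objective: alternative
-- what changed: A's single flag-gated loop with a mutable (remaining, market, sport) state is replaced by two independent first-index searches over the token list plus one index-filtering join that rebuilds the team query.
import Mathlib
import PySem

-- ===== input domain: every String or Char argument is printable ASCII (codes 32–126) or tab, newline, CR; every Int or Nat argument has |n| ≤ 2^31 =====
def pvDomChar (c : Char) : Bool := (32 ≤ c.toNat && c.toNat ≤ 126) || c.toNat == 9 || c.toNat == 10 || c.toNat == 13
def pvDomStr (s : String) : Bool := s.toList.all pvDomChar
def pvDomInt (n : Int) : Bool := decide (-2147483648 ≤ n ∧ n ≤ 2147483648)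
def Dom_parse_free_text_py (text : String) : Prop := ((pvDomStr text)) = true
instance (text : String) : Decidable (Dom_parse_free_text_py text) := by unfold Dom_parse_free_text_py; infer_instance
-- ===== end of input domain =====

-- B replaces A's single flag-gated accumulator loop by two independent first-index searches plus an
-- index-filtering join (objective: alternative decomposition, same cost); the unused Python import is not modelled.

def pvMK : PySem.Dict String String := PySem.Dict.mk
  [("moneyline", "h2h"), ("ml", "h2h"), ("spread", "spreads"), ("spreads", "spreads"),
   ("ats", "spreads"), ("total", "totals"), ("totals", "totals"), ("ou", "totals"),
   ("props", "player_props"), ("prop", "player_props")]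

def pvSK : PySem.Dict String (List String) := PySem.Dict.mk
  [("nhl", ["icehockey_nhl"]), ("hockey", ["icehockey_nhl"]), ("nba", ["basketball_nba"]),
   ("basketball", ["basketball_nba"]), ("mlb", ["baseball_mlb"]), ("baseball", ["baseball_mlb"]),
   ("epl", ["soccer_epl"]), ("premier", ["soccer_epl"]), ("laliga", ["soccer_spain_la_liga"]),
   ("la liga", ["soccer_spain_la_liga"]), ("bundesliga", ["soccer_germany_bundesliga"]),
   ("mls", ["soccer_usa_mls"]),
   ("soccer", ["soccer_epl", "soccer_spain_la_liga", "soccer_germany_bundesliga", "soccer_usa_mls"])]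

-- ===== PORT A =====
-- A's for-loop over tokens, state (remaining, market_key, sport_keys)
def pvLoopA : List String → List String → Option String → Option (List String) →
    List String × Option String × Option (List String)
  | [], rem, m, s => (rem, m, s)
  | t :: ts, rem, m, s =>
    let l := PySem.Str.lower t
    if (PySem.Dict.get? pvMK l).isSome && m.isNone then
      pvLoopA ts rem (PySem.Dict.get? pvMK l) s
    else if (PySem.Dict.get? pvSK l).isSome && s.isNone then
      pvLoopA ts rem m (PySem.Dict.get? pvSK l)
    else
      pvLoopA ts (rem ++ [t]) m s

def parse_free_text_py (text : String) : String × Option String × Option (List String) :=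
  let tokens := PySem.Str.split₀ (PySem.Str.strip text)
  let r := pvLoopA tokens [] none none
  (PySem.Str.strip (PySem.Str.join " " r.1), r.2.1, r.2.2)

-- ===== PORT B =====
def pvIsMarket (t : String) : Bool := (PySem.Dict.get? pvMK (PySem.Str.lower t)).isSome
def pvIsSport (t : String) : Bool := (PySem.Dict.get? pvSK (PySem.Str.lower t)).isSome

-- next((j for j, t in enumerate(tokens) if p(t)), None), counter started at i
def pvNextIdx (p : String → Bool) : Nat → List String → Option Nat
  | _, [] => none
  | i, t :: ts => if p t then some i else pvNextIdx p (i + 1) ts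

-- the genexp '(t for i, t in enumerate(tokens) if i != midx and i != sidx)'
def pvKeepB : Nat → List String → Option Nat → Option Nat → List String
  | _, [], _, _ => []
  | i, t :: ts, mo, so =>
    if (some i != mo) && (some i != so) then t :: pvKeepB (i + 1) ts mo so
    else pvKeepB (i + 1) ts mo so

def parse_free_text_py_alt (text : String) : String × Option String × Option (List String) :=
  let tokens := PySem.Str.split₀ (PySem.Str.strip text)
  let midx := pvNextIdx pvIsMarket 0 tokens
  let sidx := pvNextIdx pvIsSport 0 tokens
  let market : Option String :=
    match midx with
    | some i => (tokens[i]?).bind (fun t => PySem.Dict.get? pvMK (PySem.Str.lower t))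
    | none => none
  let sport : Option (List String) :=
    match sidx with
    | some i => (tokens[i]?).bind (fun t => PySem.Dict.get? pvSK (PySem.Str.lower t))
    | none => none
  (PySem.Str.strip (PySem.Str.join " " (pvKeepB 0 tokens midx sidx)), market, sport)

-- ===== PRECONDITION & SPEC =====
def Spec_parse_free_text_py (text : String) (out : String × Option String × Option (List String)) : Prop := out = parse_free_text_py_alt text
instance (text : String) (out : String × Option String × Option (List String)) : Decidable (Spec_parse_free_text_py text out) := by unfold Spec_parse_free_text_py; infer_instance

-- ===== CLAIM (what is proved, stated in full; the proofs are below) =====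
def Claim_equal_parse_free_text_py : Prop := ∀ (text : String), Dom_parse_free_text_py text → Spec_parse_free_text_py text (parse_free_text_py text)

-- ===== LEMMAS AND PROOFS =====

-- the two keyword vocabularies are disjoint
theorem pv_disj (l : String) (h : (PySem.Dict.get? pvMK l).isSome = true) :
    (PySem.Dict.get? pvSK l).isSome = false := by
  simp only [pvMK, PySem.Dict.get?_mk_cons] at h
  split_ifs at h
  all_goals first
    | (simp_all; subst_eqs; decide)
    | simp_all [PySem.Dict.get?]

theorem pv_disj' (t : String) (h : pvIsMarket t = true) : pvIsSport t = false :=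
  pv_disj (PySem.Str.lower t) h

-- first market value / first sport value in a token list
def pvValM : List String → Option String
  | [] => none
  | t :: ts => if pvIsMarket t then PySem.Dict.get? pvMK (PySem.Str.lower t) else pvValM ts

def pvValS : List String → Option (List String)
  | [] => none
  | t :: ts => if pvIsSport t then PySem.Dict.get? pvSK (PySem.Str.lower t) else pvValS ts

-- tokens A keeps, given the two flags
def pvKeepA : List String → Bool → Bool → List String
  | [], _, _ => []
  | t :: ts, mT, sT =>
    if pvIsMarket t && !mT then pvKeepA ts true sT
    else if pvIsSport t && !sT then pvKeepA ts mT true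
    else t :: pvKeepA ts mT sT

theorem pvLoopA_char (toks : List String) : ∀ (rem : List String) (m : Option String) (s : Option (List String)),
    pvLoopA toks rem m s =
      (rem ++ pvKeepA toks m.isSome s.isSome,
       (if m.isSome then m else pvValM toks),
       (if s.isSome then s else pvValS toks)) := by
  induction toks with
  | nil => intro rem m s; simp [pvLoopA, pvKeepA, pvValM, pvValS]
  | cons t ts ih =>
    intro rem m s
    by_cases hm : pvIsMarket t = true
    · have hs := pv_disj' t hm
      unfold pvIsMarket at hm
      unfold pvIsSport at hs
      cases m with
      | none => simp [pvLoopA, pvKeepA, pvValM, pvValS, hm, hs, ih, pvIsMarket, pvIsSport]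
      | some v => simp [pvLoopA, pvKeepA, pvValS, hm, hs, ih, pvIsMarket, pvIsSport]
    · by_cases hs : pvIsSport t = true
      · unfold pvIsMarket at hm
        unfold pvIsSport at hs
        cases s with
        | none =>
          simp [pvLoopA, pvKeepA, pvValM, pvValS, hm, hs, ih, pvIsMarket, pvIsSport]
        | some v =>
          simp [pvLoopA, pvKeepA, pvValM, hm, hs, ih, pvIsMarket, pvIsSport]
      · unfold pvIsMarket at hm
        unfold pvIsSport at hs
        simp [pvLoopA, pvKeepA, pvValM, pvValS, hm, hs, ih, pvIsMarket, pvIsSport,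
          List.append_assoc]

theorem pvNextIdx_ge (p : String → Bool) (toks : List String) : ∀ (i j : Nat),
    pvNextIdx p i toks = some j → i ≤ j := by
  induction toks with
  | nil => intro i j h; simp [pvNextIdx] at h
  | cons t ts ih =>
    intro i j h
    by_cases hp : p t = true
    · simp [pvNextIdx, hp] at h; omega
    · simp [pvNextIdx, hp] at h
      have := ih (i + 1) j h
      omega

-- an index below the running counter never fires again (market slot)
theorem pvKeepB_ltM (toks : List String) : ∀ (i k : Nat) (so : Option Nat), k < i →
    pvKeepB i toks (some k) so = pvKeepB i toks none so := by
  induction toks with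
  | nil => intro i k so h; simp [pvKeepB]
  | cons t ts ih =>
    intro i k so h
    have hik : ¬ i = k := by omega
    by_cases hso : some i = so <;>
      simp [pvKeepB, hik, hso, ih (i + 1) k so (by omega)]

-- an index below the running counter never fires again (sport slot)
theorem pvKeepB_ltS (toks : List String) : ∀ (i k : Nat) (mo : Option Nat), k < i →
    pvKeepB i toks mo (some k) = pvKeepB i toks mo none := by
  induction toks with
  | nil => intro i k mo h; simp [pvKeepB]
  | cons t ts ih =>
    intro i k mo h
    have hik : ¬ i = k := by omega
    by_cases hmo : some i = mo <;>
      simp [pvKeepB, hik, hmo, ih (i + 1) k mo (by omega)]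

-- the current index differs from any first-match index sought in the tail
theorem pv_head_ne (p : String → Bool) (ts : List String) (i : Nat) (flag : Bool) :
    (some i != (if flag then none else pvNextIdx p (i + 1) ts)) = true := by
  cases flag with
  | true => simp
  | false =>
    cases h : pvNextIdx p (i + 1) ts with
    | none => simp
    | some j =>
      have := pvNextIdx_ge p ts (i + 1) j h
      simp; omega

theorem pvKeepB_char (toks : List String) : ∀ (i : Nat) (mT sT : Bool),
    pvKeepB i toks (if mT then none else pvNextIdx pvIsMarket i toks)
                   (if sT then none else pvNextIdx pvIsSport i toks)
      = pvKeepA toks mT sT := by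
  induction toks with
  | nil => intro i mT sT; cases mT <;> cases sT <;> simp [pvKeepB, pvKeepA]
  | cons t ts ih =>
    intro i mT sT
    by_cases hdm : pvIsMarket t = true ∧ mT = false
    · -- head consumed as the first market token
      obtain ⟨hm, hmT⟩ := hdm
      have hs := pv_disj' t hm
      subst hmT
      have hmidx : pvNextIdx pvIsMarket i (t :: ts) = some i := by simp [pvNextIdx, hm]
      have hsidx : pvNextIdx pvIsSport i (t :: ts) = pvNextIdx pvIsSport (i + 1) ts := by
        simp [pvNextIdx, hs]
      simp only [Bool.false_eq_true, if_false, hmidx, hsidx]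
      have hdrop : pvKeepB i (t :: ts) (some i) (if sT then none else pvNextIdx pvIsSport (i + 1) ts)
          = pvKeepB (i + 1) ts (some i) (if sT then none else pvNextIdx pvIsSport (i + 1) ts) := by
        simp [pvKeepB]
      rw [hdrop, pvKeepB_ltM ts (i + 1) i _ (by omega)]
      have := ih (i + 1) true sT
      simpa [pvKeepA, hm, hs] using this
    · by_cases hds : pvIsSport t = true ∧ sT = false
      · -- head consumed as the first sport token
        obtain ⟨hs, hsT⟩ := hds
        have hm : pvIsMarket t = false := by
          cases h : pvIsMarket t with
          | false => rfl
          | true => rw [pv_disj' t h] at hs; exact absurd hs (by simp)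
        subst hsT
        have hsidx : pvNextIdx pvIsSport i (t :: ts) = some i := by simp [pvNextIdx, hs]
        have hmidx : pvNextIdx pvIsMarket i (t :: ts) = pvNextIdx pvIsMarket (i + 1) ts := by
          simp [pvNextIdx, hm]
        simp only [Bool.false_eq_true, if_false, hsidx, hmidx]
        have hne := pv_head_ne pvIsMarket ts i mT
        have hstep : pvKeepB i (t :: ts) (if mT then none else pvNextIdx pvIsMarket (i + 1) ts) (some i)
            = pvKeepB (i + 1) ts (if mT then none else pvNextIdx pvIsMarket (i + 1) ts) (some i) := by
          simp [pvKeepB, hne]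
        rw [hstep, pvKeepB_ltS ts (i + 1) i _ (by omega)]
        have := ih (i + 1) mT true
        simpa [pvKeepA, hm, hs] using this
      · -- head kept by both
        have hm : pvIsMarket t = true → mT = true := by
          intro h; cases mT with
          | true => rfl
          | false => exact absurd ⟨h, rfl⟩ hdm
        have hs2 : pvIsSport t = true → sT = true := by
          intro h; cases sT with
          | true => rfl
          | false => exact absurd ⟨h, rfl⟩ hds
        have hA : pvKeepA (t :: ts) mT sT = t :: pvKeepA ts mT sT := by
          simp only [pvKeepA]
          rw [if_neg (by cases h : pvIsMarket t with
                | false => simp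
                | true => simp [hm h]),
              if_neg (by cases h2 : pvIsSport t with
                | false => simp
                | true => simp [hs2 h2])]
        have hmidx : (if mT then none else pvNextIdx pvIsMarket i (t :: ts))
            = (if mT then none else pvNextIdx pvIsMarket (i + 1) ts) := by
          cases mT with
          | true => simp
          | false =>
            have hfm : pvIsMarket t = false := by
              cases h : pvIsMarket t with
              | false => rfl
              | true => exact absurd (hm h) (by simp)
            simp [pvNextIdx, hfm]
        have hsidx : (if sT then none else pvNextIdx pvIsSport i (t :: ts))
            = (if sT then none else pvNextIdx pvIsSport (i + 1) ts) := by
          cases sT with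
          | true => simp
          | false =>
            have hfs : pvIsSport t = false := by
              cases h : pvIsSport t with
              | false => rfl
              | true => exact absurd (hs2 h) (by simp)
            simp [pvNextIdx, hfs]
        rw [hmidx, hsidx, hA]
        have hneM := pv_head_ne pvIsMarket ts i mT
        have hneS := pv_head_ne pvIsSport ts i sT
        have hstep : pvKeepB i (t :: ts) (if mT then none else pvNextIdx pvIsMarket (i + 1) ts)
              (if sT then none else pvNextIdx pvIsSport (i + 1) ts)
            = t :: pvKeepB (i + 1) ts (if mT then none else pvNextIdx pvIsMarket (i + 1) ts)
              (if sT then none else pvNextIdx pvIsSport (i + 1) ts) := by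
          simp [pvKeepB, hneM, hneS]
        rw [hstep, ih (i + 1) mT sT]

theorem pvVal_charM (toks : List String) : ∀ (i : Nat),
    (match pvNextIdx pvIsMarket i toks with
     | some j => (toks[j - i]?).bind (fun t => PySem.Dict.get? pvMK (PySem.Str.lower t))
     | none => none) = pvValM toks := by
  induction toks with
  | nil => intro i; simp [pvNextIdx, pvValM]
  | cons t ts ih =>
    intro i
    by_cases hp : pvIsMarket t = true
    · simp [pvNextIdx, hp, pvValM]
    · have hstep : pvNextIdx pvIsMarket i (t :: ts) = pvNextIdx pvIsMarket (i + 1) ts := by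
        simp [pvNextIdx, hp]
      rw [hstep]
      have hv : pvValM (t :: ts) = pvValM ts := by simp [pvValM, hp]
      rw [hv, ← ih (i + 1)]
      cases h : pvNextIdx pvIsMarket (i + 1) ts with
      | none => simp
      | some j =>
        have hge := pvNextIdx_ge pvIsMarket ts (i + 1) j h
        have hidx : (t :: ts)[j - i]? = ts[j - (i + 1)]? := by
          have : j - i = (j - (i + 1)) + 1 := by omega
          rw [this]; simp
        simp [hidx]

theorem pvVal_charS (toks : List String) : ∀ (i : Nat),
    (match pvNextIdx pvIsSport i toks with
     | some j => (toks[j - i]?).bind (fun t => PySem.Dict.get? pvSK (PySem.Str.lower t))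
     | none => none) = pvValS toks := by
  induction toks with
  | nil => intro i; simp [pvNextIdx, pvValS]
  | cons t ts ih =>
    intro i
    by_cases hp : pvIsSport t = true
    · simp [pvNextIdx, hp, pvValS]
    · have hstep : pvNextIdx pvIsSport i (t :: ts) = pvNextIdx pvIsSport (i + 1) ts := by
        simp [pvNextIdx, hp]
      rw [hstep]
      have hv : pvValS (t :: ts) = pvValS ts := by simp [pvValS, hp]
      rw [hv, ← ih (i + 1)]
      cases h : pvNextIdx pvIsSport (i + 1) ts with
      | none => simp
      | some j =>
        have hge := pvNextIdx_ge pvIsSport ts (i + 1) j h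
        have hidx : (t :: ts)[j - i]? = ts[j - (i + 1)]? := by
          have : j - i = (j - (i + 1)) + 1 := by omega
          rw [this]; simp
        simp [hidx]

-- ===== VERDICT (by name: the statement is the Claim_ definition above) =====
theorem parse_free_text_py_spec : Claim_equal_parse_free_text_py := by
  intro text _
  unfold Spec_parse_free_text_py
  simp only [parse_free_text_py, parse_free_text_py_alt]
  generalize PySem.Str.split₀ (PySem.Str.strip text) = toks
  rw [pvLoopA_char toks [] none none]
  have hkeep := pvKeepB_char toks 0 false false
  simp only [if_neg Bool.false_ne_true] at hkeep
  have hm := pvVal_charM toks 0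
  have hs := pvVal_charS toks 0
  simp only [Nat.sub_zero] at hm hs
  simp [hkeep, hm, hs]
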